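-- pv_equiv track=rewrite | github.com/LiamK21/GH-bot-Rust | card_sorting_eval.py | _is_model_dir
-- ===== SOURCE A (Python) =====
-- from enum import StrEnum
--
-- class Model(StrEnum):
--     GPT_4O = "gpt-4o"
--     DEEPSEEK = "deepseek-r1-distill-llama-70b"
--     LLAMA = "llama-3.3-70b-versatile"
--
-- def _is_model_dir(dir_name: str) -> bool:
--     dir_parts = dir_name.split("_")
--     if not len(dir_parts) == 2:
--         return False
--
--     attempt, model = dir_parts
--     if not attempt.startswith("i"):
--         return False
--     if model not in [m.value for m in Model]:
--         return False
--     return True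
-- ===== SOURCE B (Python) =====
-- def _is_model_dir(dir_name: str) -> bool:
--     # Suffix matching instead of splitting: a valid name is exactly an "i..."
--     # head with no underscore followed by an underscore and a model name; no model name contains
--     # an underscore, so matching the "_<model>" suffix and checking the head
--     # is equivalent to the split-into-two-parts rule.
--     for model in ("gpt-4o", "deepseek-r1-distill-llama-70b", "llama-3.3-70b-versatile"):
--         if dir_name.endswith("_" + model):
--             head = dir_name[: -len(model) - 1]
--             return head.startswith("i") and "_" not in head
--     return False
-- ===== Notes on version B (the rewrite author's own statement) =====
-- stated objective: alternative
-- what changed: B never splits the string: it matches one of the three underscore-plus-model-name suffixes with endswith and then validates the remaining head (starts with 'i', contains no underscore), correct because no model name contains an underscore.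
import Mathlib
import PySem

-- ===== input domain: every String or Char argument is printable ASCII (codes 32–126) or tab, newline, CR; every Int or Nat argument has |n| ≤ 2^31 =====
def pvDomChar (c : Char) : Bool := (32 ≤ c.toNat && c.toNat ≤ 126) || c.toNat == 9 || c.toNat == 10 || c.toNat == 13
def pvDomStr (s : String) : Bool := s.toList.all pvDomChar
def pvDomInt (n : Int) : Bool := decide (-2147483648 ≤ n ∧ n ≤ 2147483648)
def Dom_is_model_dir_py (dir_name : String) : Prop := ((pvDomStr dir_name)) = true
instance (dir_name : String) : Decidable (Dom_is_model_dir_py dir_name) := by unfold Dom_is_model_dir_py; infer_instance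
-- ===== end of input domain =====

-- B matches one of the three underscore-plus-model-name suffixes and validates the remaining head instead of
-- splitting at "_" and counting parts (alternative algorithm; equal because no model name
-- contains an underscore).


-- ===== PORT A =====
-- [m.value for m in Model]
def pvModelStrs : List String := ["gpt-4o", "deepseek-r1-distill-llama-70b", "llama-3.3-70b-versatile"]

def is_model_dir_py (dir_name : String) : Bool :=
  match PySem.Str.split? dir_name "_" with
  | none => false        -- unreachable: the separator "_" is nonempty
  | some dir_parts =>
    if !(dir_parts.length == 2) then false
    else
      match dir_parts with
      | [attempt, model] =>
        if !(PySem.Str.startswith attempt "i") then false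
        else if !(pvModelStrs.contains model) then false
        else true
      | _ => false       -- unreachable given the length check

-- ===== PORT B =====
-- the three model names, as char lists
def pvModels : List (List Char) :=
  ["gpt-4o".toList, "deepseek-r1-distill-llama-70b".toList, "llama-3.3-70b-versatile".toList]

-- B's for-loop over the model tuple: try each underscore-plus-model suffix; on the first match,
-- validate the head dir_name[:-len(model)-1]
def pvAltLoop (l : List Char) : List (List Char) → Bool
  | [] => false
  | m :: rest =>
    if PySem.Chars.endswith l ('_' :: m) then
      let head := PySem.List.slice l none (some (-((m.length : Int) + 1)))
      PySem.Chars.startswith head ['i'] && !(PySem.Chars.isIn ['_'] head)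
    else pvAltLoop l rest

def is_model_dir_py_alt (dir_name : String) : Bool :=
  pvAltLoop dir_name.toList pvModels

-- ===== PRECONDITION & SPEC =====
def Spec_is_model_dir_py (dir_name : String) (out : Bool) : Prop := out = is_model_dir_py_alt dir_name
instance (dir_name : String) (out : Bool) : Decidable (Spec_is_model_dir_py dir_name out) := by unfold Spec_is_model_dir_py; infer_instance

-- ===== CLAIM (what is proved, stated in full; the proofs are below) =====
def Claim_equal_is_model_dir_py : Prop := ∀ (dir_name : String), Dom_is_model_dir_py dir_name → Spec_is_model_dir_py dir_name (is_model_dir_py dir_name)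

-- ===== LEMMAS AND PROOFS =====

-- reference recursion computing Chars.splitOn on the separator ['_']
def pvSplitSimple : List Char → List Char → List (List Char)
  | pre, [] => [pre]
  | pre, c :: rest => if c = '_' then pre :: pvSplitSimple [] rest else pvSplitSimple (pre ++ [c]) rest

-- the part of l after its FIRST '_' (none if l has no underscore): the common characterization
def pvPartitionTail : List Char → Option (List Char)
  | [] => none
  | c :: t => if c = '_' then some t else pvPartitionTail t

theorem pv_go_spec (fuel : Nat) : ∀ (l cur : List Char) (acc : List (List Char)), l.length < fuel →
    PySem.Chars.splitOn.go ['_'] fuel l cur acc = acc.reverse ++ pvSplitSimple cur.reverse l := by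
  induction fuel with
  | zero => intro l cur acc h; exact absurd h (Nat.not_lt_zero _)
  | succ f ih =>
    intro l cur acc h
    cases l with
    | nil => simp [PySem.Chars.splitOn.go, pvSplitSimple]
    | cons c rest =>
      rw [PySem.Chars.splitOn.go]
      by_cases hc : c = '_'
      · subst hc
        simp only [List.isPrefixOf, BEq.rfl, Bool.and_true, if_pos, List.length_cons,
          List.length_nil, List.drop_succ_cons, List.drop_zero]
        rw [ih rest [] (cur.reverse :: acc) (by simpa using Nat.lt_of_succ_lt_succ h)]
        simp [pvSplitSimple]
      · have hpre : List.isPrefixOf ['_'] (c :: rest) = false := by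
          simp [List.isPrefixOf]; exact fun hh => (hc hh.symm).elim
        rw [hpre]
        simp only [Bool.false_eq_true, if_false]
        rw [ih rest (c :: cur) acc (by simpa using Nat.lt_of_succ_lt_succ h)]
        simp [pvSplitSimple, hc]

theorem pv_splitOn_eq (l : List Char) : PySem.Chars.splitOn l ['_'] = pvSplitSimple [] l := by
  have := pv_go_spec (l.length + 1) l [] [] (by omega)
  simpa [PySem.Chars.splitOn] using this

theorem pv_startswith_i (s : List Char) :
    PySem.Chars.startswith s ['i'] = decide (s.head? = some 'i') := by
  have hiff := PySem.Chars.startswith_iff s ['i']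
  cases s with
  | nil =>
    simp only [List.head?_nil] at *
    rcases Bool.eq_false_or_eq_true (PySem.Chars.startswith [] ['i']) with h | h <;> rw [h] <;>
      simp_all [List.prefix_nil]
  | cons c t =>
    rw [List.cons_prefix_cons] at hiff
    simp only [List.nil_prefix, and_true, List.head?_cons, Option.some.injEq] at *
    by_cases e : c = 'i'
    · subst e
      simp [hiff.mpr rfl]
    · have hf : PySem.Chars.startswith (c :: t) ['i'] = false :=
        Bool.eq_false_iff.mpr (fun h => e (hiff.mp h).symm)
      simp [hf, e]

theorem pv_noUnderscore (l : List Char) : ∀ pre, '_' ∉ l → pvSplitSimple pre l = [pre ++ l] := by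
  induction l with
  | nil => intro pre h; simp [pvSplitSimple]
  | cons c rest ih =>
    intro pre h
    have hc : ¬ c = '_' := fun e => h (e ▸ List.mem_cons_self ..)
    simp [pvSplitSimple, hc, ih (pre ++ [c]) (fun m => h (List.mem_cons_of_mem _ m))]

theorem pv_length_split (l : List Char) : ∀ pre, (pvSplitSimple pre l).length = l.count '_' + 1 := by
  induction l with
  | nil => intro pre; simp [pvSplitSimple]
  | cons c rest ih =>
    intro pre
    by_cases hc : c = '_' <;> simp [pvSplitSimple, hc, ih]

theorem pv_models_no_underscore (m : List Char) (h : pvModels.contains m = true) : '_' ∉ m := by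
  have hm : m ∈ pvModels := by simpa using h
  fin_cases hm <;> decide

-- A's inner body, on char lists
def pvAMatch : List (List Char) → Bool
  | [a, m] =>
    if !(PySem.Chars.startswith a ['i']) then false
    else if !(pvModels.contains m) then false
    else true
  | _ => false

theorem pvAMatch_pair (a m : List Char) :
    pvAMatch [a, m] = (PySem.Chars.startswith a ['i'] && pvModels.contains m) := by
  cases hS : PySem.Chars.startswith a ['i'] <;> cases hC : pvModels.contains m <;>
    simp only [pvAMatch, hS, hC, Bool.not_true, Bool.not_false, if_pos, if_false, if_true,
      Bool.and_false, Bool.and_true, Bool.false_and, Bool.true_and] <;> rfl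

theorem pv_key (l : List Char) : ∀ pre, pre ≠ [] →
    pvAMatch (pvSplitSimple pre l)
      = (decide (pre.head? = some 'i') &&
         (match pvPartitionTail l with
          | none => false
          | some t => pvModels.contains t)) := by
  induction l with
  | nil => intro pre hpre; simp [pvSplitSimple, pvAMatch, pvPartitionTail]
  | cons c rest ih =>
    intro pre hpre
    by_cases hc : c = '_'
    · subst hc
      have h1 : pvSplitSimple pre ('_' :: rest) = pre :: pvSplitSimple [] rest := by
        simp [pvSplitSimple]
      have h2 : pvPartitionTail ('_' :: rest) = some rest := by simp [pvPartitionTail]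
      rw [h1, h2]
      by_cases hu : '_' ∈ rest
      · have hlen : (pvSplitSimple ([] : List Char) rest).length ≥ 2 := by
          rw [pv_length_split]
          have : rest.count '_' ≥ 1 := List.one_le_count_iff.mpr hu
          omega
        have hcont : pvModels.contains rest = false :=
          Bool.eq_false_iff.mpr (fun h => pv_models_no_underscore rest h hu)
        rcases e : pvSplitSimple ([] : List Char) rest with _ | ⟨x, _ | ⟨y, t⟩⟩
        · rw [e] at hlen; simp at hlen
        · rw [e] at hlen; simp at hlen
        · simp only [pvAMatch]
          simp only [Bool.false_eq, Bool.and_eq_false_iff, decide_eq_false_iff_not]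
          refine Or.inr ?_
          simpa using hcont
      · rw [pv_noUnderscore rest [] hu]
        simp [pvAMatch_pair, pv_startswith_i]
    · have h1 : pvSplitSimple pre (c :: rest) = pvSplitSimple (pre ++ [c]) rest := by
        simp [pvSplitSimple, hc]
      have h2 : pvPartitionTail (c :: rest) = pvPartitionTail rest := by
        simp [pvPartitionTail, hc]
      rw [h1, h2, ih (pre ++ [c]) (by simp)]
      cases pre with
      | nil => exact absurd rfl hpre
      | cons p ps => simp

theorem pv_mainChar (l : List Char) :
    pvAMatch (pvSplitSimple [] l)
      = (if !(PySem.Chars.startswith l ['i']) then false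
         else match pvPartitionTail l with
              | none => false
              | some t => pvModels.contains t) := by
  cases l with
  | nil => simp [pvSplitSimple, pvAMatch, pv_startswith_i]
  | cons c rest =>
    by_cases hc : c = '_'
    · subst hc
      have h1 : pvSplitSimple [] ('_' :: rest) = [] :: pvSplitSimple [] rest := by
        simp [pvSplitSimple]
      have hsw : PySem.Chars.startswith ('_' :: rest) ['i'] = false := by
        rw [pv_startswith_i]; simp
      rw [h1, hsw]
      simp only [Bool.not_false, if_true]
      rcases pvSplitSimple ([] : List Char) rest with _ | ⟨m, _ | ⟨y, t⟩⟩
      · simp [pvAMatch]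
      · rw [pvAMatch_pair, pv_startswith_i]; simp
      · simp [pvAMatch]
    · have h1 : pvSplitSimple [] (c :: rest) = pvSplitSimple [c] rest := by
        simp [pvSplitSimple, hc]
      have h2 : pvPartitionTail (c :: rest) = pvPartitionTail rest := by
        simp [pvPartitionTail, hc]
      rw [h1, h2, pv_key rest [c] (by simp), pv_startswith_i]
      by_cases hi : c = 'i' <;> simp [hi]

theorem pv_contains_eq (m : String) : pvModelStrs.contains m = pvModels.contains m.toList := by
  simp [pvModelStrs, pvModels, ← String.toList_inj]

theorem pvA_bridge (P : List String) :
    (if !(P.length == 2) then false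
     else match P with
       | [attempt, model] =>
         if !(PySem.Str.startswith attempt "i") then false
         else if !(pvModelStrs.contains model) then false
         else true
       | _ => false) = pvAMatch (P.map String.toList) := by
  rcases P with _ | ⟨a, _ | ⟨m, _ | ⟨x, t⟩⟩⟩
  · simp [pvAMatch]
  · simp [pvAMatch]
  · simp only [List.map_cons, List.map_nil, pvAMatch_pair, List.length_cons, List.length_nil]
    have : PySem.Str.startswith a "i" = PySem.Chars.startswith a.toList ['i'] :=
      PySem.Str.startswith_eq a "i"
    rw [pv_contains_eq m]
    cases hS : PySem.Chars.startswith a.toList ['i'] <;>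
      cases hC : pvModels.contains m.toList <;>
        simp [this, hS, hC]
  · simp [pvAMatch]

-- A, characterized over char lists via the first-underscore decomposition
theorem pvA_char (s : String) :
    is_model_dir_py s
      = (if !(PySem.Chars.startswith s.toList ['i']) then false
         else match pvPartitionTail s.toList with
              | none => false
              | some t => pvModels.contains t) := by
  have hmap := PySem.Str.split?_map s "_"
  cases h : PySem.Str.split? s "_" with
  | none => rw [h] at hmap; simp [PySem.Chars.split?] at hmap
  | some P =>
    rw [h] at hmap
    have hP : P.map String.toList = pvSplitSimple [] s.toList := by
      have h2 : PySem.Chars.split? s.toList "_".toList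
          = some (PySem.Chars.splitOn s.toList ['_']) := by
        simp [PySem.Chars.split?]
      rw [h2, pv_splitOn_eq] at hmap
      simpa using hmap
    have hA : is_model_dir_py s = pvAMatch (P.map String.toList) := by
      unfold is_model_dir_py
      rw [h]
      exact pvA_bridge P
    rw [hA, hP, pv_mainChar]

-- ===== B-side lemmas =====

theorem pv_partition_append (h t : List Char) (hh : '_' ∉ h) :
    pvPartitionTail (h ++ '_' :: t) = some t := by
  induction h with
  | nil => simp [pvPartitionTail]
  | cons c rest ih =>
    have hc : ¬ c = '_' := fun e => hh (e ▸ List.mem_cons_self ..)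
    simp only [List.cons_append, pvPartitionTail, if_neg hc]
    exact ih (fun m => hh (List.mem_cons_of_mem _ m))

theorem pv_partition_some (l t : List Char) (h : pvPartitionTail l = some t) :
    ∃ hd, l = hd ++ '_' :: t ∧ '_' ∉ hd := by
  induction l with
  | nil => simp [pvPartitionTail] at h
  | cons c rest ih =>
    by_cases hc : c = '_'
    · subst hc
      simp [pvPartitionTail] at h
      exact ⟨[], by simp [h], by simp⟩
    · simp only [pvPartitionTail, if_neg hc] at h
      obtain ⟨hd, he, hm⟩ := ih h
      exact ⟨c :: hd, by simp [he], by
        intro m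
        rcases List.mem_cons.mp m with e | e
        · exact hc e.symm
        · exact hm e⟩

-- startswith "i" only looks at the first character, which an appended tail does not change
theorem pv_startswith_append (h t : List Char) :
    PySem.Chars.startswith (h ++ '_' :: t) ['i'] = PySem.Chars.startswith h ['i'] := by
  rw [pv_startswith_i, pv_startswith_i]
  cases h <;> simp

-- dir_name[:-len(m)-1] is the part before the matched underscore-plus-model suffix
theorem pv_slice_head (pre m : List Char) :
    PySem.List.slice (pre ++ '_' :: m) none (some (-((m.length : Int) + 1))) = pre := by
  have hcast : -((m.length : Int) + 1) = -(((m.length + 1 : Nat)) : Int) := by push_cast; ring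
  rw [hcast, PySem.List.slice_to_neg_natCast _ _ (by omega)]
  have hlen : (pre ++ '_' :: m).length - (m.length + 1) = pre.length := by simp
  rw [hlen, List.take_left]

theorem pv_isIn_singleton (l : List Char) :
    PySem.Chars.isIn ['_'] l = decide ('_' ∈ l) := by
  by_cases h : '_' ∈ l
  · obtain ⟨a, b, e⟩ := List.append_of_mem h
    rw [(PySem.Chars.isIn_iff_infix _ _).mpr ⟨a, b, by simp [e]⟩]
    simp [h]
  · have : ¬ ['_'] <:+: l := fun hi => h (by
      have := hi.subset (List.mem_singleton_self '_')
      simpa using this)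
    rw [(PySem.Chars.isIn_eq_false_iff _ _).mpr this]
    simp [h]

theorem pvAltLoop_noUnderscore (l : List Char) (h : '_' ∉ l) :
    ∀ ms : List (List Char), pvAltLoop l ms = false := by
  intro ms
  induction ms with
  | nil => rfl
  | cons m rest ih =>
    have he : PySem.Chars.endswith l ('_' :: m) = false := by
      apply Bool.eq_false_iff.mpr
      intro hT
      obtain ⟨s, hs⟩ := (PySem.Chars.endswith_iff _ _).mp hT
      exact h (by rw [← hs]; simp)
    simp only [pvAltLoop, he, Bool.false_eq_true, if_false]
    exact ih

theorem pvAltLoop_some (l hd t : List Char) (hl : l = hd ++ '_' :: t) (hh : '_' ∉ hd) :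
    ∀ ms : List (List Char), (∀ m ∈ ms, '_' ∉ m) →
      pvAltLoop l ms = (ms.contains t && PySem.Chars.startswith l ['i']) := by
  intro ms
  induction ms with
  | nil => intro _; simp [pvAltLoop]
  | cons m rest ih =>
    intro hms
    have hm : '_' ∉ m := hms m (List.mem_cons_self ..)
    have hrest : ∀ x ∈ rest, '_' ∉ x := fun x hx => hms x (List.mem_cons_of_mem _ hx)
    by_cases he : PySem.Chars.endswith l ('_' :: m) = true
    · obtain ⟨pre, hpre⟩ := (PySem.Chars.endswith_iff _ _).mp he
      -- l = pre ++ '_' :: m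
      have hlp : l = pre ++ '_' :: m := hpre.symm
      have hhead : PySem.List.slice l none (some (-((m.length : Int) + 1))) = pre := by
        rw [hlp]; exact pv_slice_head pre m
      have hcount : pre.count '_' = t.count '_' := by
        have h1 : l.count '_' = pre.count '_' + (m.count '_' + 1) := by
          rw [hlp]; simp [List.count_append, List.count_cons]
        have h2 : l.count '_' = hd.count '_' + (t.count '_' + 1) := by
          rw [hl]; simp [List.count_append, List.count_cons]
        have hm0 : m.count '_' = 0 := List.count_eq_zero.mpr hm
        have hh0 : hd.count '_' = 0 := List.count_eq_zero.mpr hh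
        omega
      simp only [pvAltLoop, he, if_true, hhead]
      by_cases hp : '_' ∈ pre
      · -- the head still contains an underscore: B returns false, and t ∉ m :: rest
        have htu : '_' ∈ t := by
          have : 1 ≤ pre.count '_' := List.one_le_count_iff.mpr hp
          exact List.one_le_count_iff.mp (by omega)
        have hnt : (m :: rest).contains t = false := by
          apply Bool.eq_false_iff.mpr
          intro hc
          have : t ∈ m :: rest := by simpa using hc
          exact hms t this htu
        have h1 : decide ('_' ∈ pre) = true := by simp [hp]
        rw [pv_isIn_singleton, h1, hnt]
        simp
      · -- no underscore in the head: m is THE tail after the first underscore, so m = t, pre = hd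
        have hmt : m = t := by
          have e1 : pvPartitionTail l = some m := by rw [hlp]; exact pv_partition_append pre m hp
          have e2 : pvPartitionTail l = some t := by rw [hl]; exact pv_partition_append hd t hh
          exact Option.some.injEq .. ▸ (e1.symm.trans e2) |> Option.some.inj
        subst hmt
        have hpreh : pre = hd := by
          have : pre ++ '_' :: m = hd ++ '_' :: m := by rw [← hlp, hl]
          exact (List.append_inj' this rfl).1
        subst hpreh
        have hct : (m :: rest).contains m = true := by simp
        rw [pv_isIn_singleton, hct, hl, pv_startswith_append]
        simp [hp]
    · have hne : t ≠ m := by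
        intro e
        subst e
        exact he ((PySem.Chars.endswith_iff _ _).mpr ⟨hd, hl.symm⟩)
      have hc : (m :: rest).contains t = rest.contains t := by
        simp [List.contains_cons, hne]
      simp only [pvAltLoop, he, if_false, Bool.false_eq_true]
      rw [ih hrest, hc]

theorem pv_models_all : ∀ m ∈ pvModels, '_' ∉ m := by decide

theorem pvB_char (l : List Char) :
    pvAltLoop l pvModels
      = (if !(PySem.Chars.startswith l ['i']) then false
         else match pvPartitionTail l with
              | none => false
              | some t => pvModels.contains t) := by
  cases hp : pvPartitionTail l with
  | none =>
    have hnu : '_' ∉ l := by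
      by_contra h
      obtain ⟨hd, t, hdecomp⟩ : ∃ hd t, l = hd ++ '_' :: t := by
        obtain ⟨a, b, e⟩ := List.append_of_mem h
        exact ⟨a, b, e⟩
      rw [hdecomp] at hp
      -- the first underscore of l exists, so pvPartitionTail cannot be none
      have : pvPartitionTail (hd ++ '_' :: t) ≠ none := by
        clear hp hdecomp
        induction hd with
        | nil => simp [pvPartitionTail]
        | cons c r ihh =>
          by_cases hc : c = '_'
          · simp [pvPartitionTail, hc]
          · simpa [pvPartitionTail, hc] using ihh
      exact this hp
    rw [pvAltLoop_noUnderscore l hnu]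
    cases hS : PySem.Chars.startswith l ['i'] <;> simp [hS]
  | some t =>
    obtain ⟨hd, hl, hh⟩ := pv_partition_some l t hp
    rw [pvAltLoop_some l hd t hl hh pvModels pv_models_all]
    cases hS : PySem.Chars.startswith l ['i'] <;>
      simp only [hS, Bool.and_false, Bool.and_true, Bool.not_true, Bool.not_false,
        Bool.false_eq_true, if_false, if_true]

theorem pv_final (s : String) : is_model_dir_py s = is_model_dir_py_alt s := by
  rw [pvA_char]
  unfold is_model_dir_py_alt
  rw [pvB_char]

-- ===== VERDICT (by name: the statement is the Claim_ definition above) =====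
theorem is_model_dir_py_spec : Claim_equal_is_model_dir_py := by
  intro dir_name _
  unfold Spec_is_model_dir_py
  exact pv_final dir_name
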